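-- pv_equiv track=rewrite | github.com/trietng/WumpusWorld | wumpusworld/sat_solver.py | extractPureSymbols
-- ===== SOURCE A (Python) =====
-- def extractPureSymbols(symbols, current_clauses):
--     pured_symbols = []
--     for symbol in symbols:
--         isPos = False # is the symbol positive?
--         isNeg = False # Is there negation in the symbol?
--
--         for clause in current_clauses:
--
--             if symbol in clause:
--                 if clause[symbol] == 1:
--                     isNeg = True
--                 elif clause[symbol] == 0:
--                     isPos = True
--
--                 if isPos and isNeg:
--                     break
--
--         if not isPos:
--             return symbol, 1
--
--         if not isNeg:
--             return symbol, 0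
--     return None, None
-- ===== SOURCE B (Python) =====
-- def extractPureSymbols(symbols, current_clauses):
--     pos = set()
--     neg = set()
--     for clause in current_clauses:
--         for k in clause:
--             v = clause[k]
--             if v == 1:
--                 neg.add(k)
--             elif v == 0:
--                 pos.add(k)
--     for symbol in symbols:
--         if symbol not in pos:
--             return symbol, 1
--         if symbol not in neg:
--             return symbol, 0
--     return None, None
-- ===== Notes on version B (the rewrite author's own statement) =====
-- stated objective: alternative
-- what changed: Instead of rescanning every clause for every symbol, B makes one pass over the clauses recording each key's observed polarities in two sets, then scans the symbols once against those sets.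
import Mathlib
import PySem

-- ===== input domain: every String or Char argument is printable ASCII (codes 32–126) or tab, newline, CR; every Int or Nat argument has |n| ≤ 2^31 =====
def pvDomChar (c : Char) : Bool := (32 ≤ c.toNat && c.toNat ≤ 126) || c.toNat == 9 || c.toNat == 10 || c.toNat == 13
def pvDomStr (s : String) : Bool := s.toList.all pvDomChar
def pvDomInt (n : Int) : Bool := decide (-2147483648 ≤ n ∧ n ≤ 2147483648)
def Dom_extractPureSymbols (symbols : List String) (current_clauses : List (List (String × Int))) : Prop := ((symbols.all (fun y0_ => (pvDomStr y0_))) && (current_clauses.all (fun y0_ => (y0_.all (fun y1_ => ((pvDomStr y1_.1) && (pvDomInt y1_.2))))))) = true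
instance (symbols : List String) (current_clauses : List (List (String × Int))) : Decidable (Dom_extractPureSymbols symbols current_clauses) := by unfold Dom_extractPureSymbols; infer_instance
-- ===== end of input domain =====

-- B records each key's polarities in one pass over the clauses, then scans the symbols once (A rescans all clauses per symbol).

-- ===== PORT A =====
-- inner 'for clause in current_clauses' loop of A, carrying (isPos, isNeg), with the break
def pvInnerA (symbol : String) : List (List (String × Int)) → Bool → Bool → Bool × Bool
  | [], isPos, isNeg => (isPos, isNeg)
  | clause :: rest, isPos, isNeg =>
    if (PySem.Dict.mk clause).contains symbol then
      let isNeg' := if (PySem.Dict.mk clause).get? symbol = some 1 then true else isNeg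
      let isPos' := if (PySem.Dict.mk clause).get? symbol = some 1 then isPos
                    else if (PySem.Dict.mk clause).get? symbol = some 0 then true else isPos
      if isPos' && isNeg' then (isPos', isNeg')
      else pvInnerA symbol rest isPos' isNeg'
    else pvInnerA symbol rest isPos isNeg

-- outer 'for symbol in symbols' loop of A
def pvOuterA (current_clauses : List (List (String × Int))) : List String → Option String × Option Int
  | [] => (none, none)
  | symbol :: rest =>
    let pn := pvInnerA symbol current_clauses false false
    if !pn.1 then (some symbol, some 1)
    else if !pn.2 then (some symbol, some 0)
    else pvOuterA current_clauses rest

def extractPureSymbols (symbols : List String) (current_clauses : List (List (String × Int))) : Option String × Option Int :=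
  pvOuterA current_clauses symbols

-- ===== PORT B =====
-- 'for k in clause: v = clause[k]; …' recording polarities into the (pos, neg) sets
def pvRecord (clause : List (String × Int)) (pn : PySem.Set String × PySem.Set String) : PySem.Set String × PySem.Set String :=
  clause.foldl (fun pn kv =>
    if (PySem.Dict.mk clause).get? kv.1 = some 1 then (pn.1, PySem.Set.add pn.2 kv.1)
    else if (PySem.Dict.mk clause).get? kv.1 = some 0 then (PySem.Set.add pn.1 kv.1, pn.2)
    else pn) pn

-- final 'for symbol in symbols' scan of B
def pvScanB (pos neg : PySem.Set String) : List String → Option String × Option Int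
  | [] => (none, none)
  | symbol :: rest =>
    if !(PySem.Set.contains pos symbol) then (some symbol, some 1)
    else if !(PySem.Set.contains neg symbol) then (some symbol, some 0)
    else pvScanB pos neg rest

def extractPureSymbols_alt (symbols : List String) (current_clauses : List (List (String × Int))) : Option String × Option Int :=
  let pn := current_clauses.foldl (fun pn clause => pvRecord clause pn) (PySem.Set.empty, PySem.Set.empty)
  pvScanB pn.1 pn.2 symbols

-- ===== PRECONDITION & SPEC =====
def Spec_extractPureSymbols (symbols : List String) (current_clauses : List (List (String × Int))) (out : Option String × Option Int) : Prop := out = extractPureSymbols_alt symbols current_clauses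
instance (symbols : List String) (current_clauses : List (List (String × Int))) (out : Option String × Option Int) : Decidable (Spec_extractPureSymbols symbols current_clauses out) := by unfold Spec_extractPureSymbols; infer_instance

-- ===== CLAIM (what is proved, stated in full; the proofs are below) =====
def Claim_equal_extractPureSymbols : Prop := ∀ (symbols : List String) (current_clauses : List (List (String × Int))), Dom_extractPureSymbols symbols current_clauses → Spec_extractPureSymbols symbols current_clauses (extractPureSymbols symbols current_clauses)

-- ===== LEMMAS AND PROOFS =====

-- A's inner loop just ORs in whether some clause maps the symbol to 0 / to 1 (the break point has both already true)
theorem pvInnerA_eq (symbol : String) (cs : List (List (String × Int))) (p n : Bool) :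
    pvInnerA symbol cs p n =
      (p || cs.any (fun c => (PySem.Dict.mk c).get? symbol = some 0),
       n || cs.any (fun c => (PySem.Dict.mk c).get? symbol = some 1)) := by
  induction cs generalizing p n with
  | nil => simp [pvInnerA]
  | cons c rest ih =>
    simp only [pvInnerA, List.any_cons]
    by_cases hc : (PySem.Dict.mk c).contains symbol = true
    · by_cases h1 : (PySem.Dict.mk c).get? symbol = some 1
      · cases p <;> cases n <;> simp [hc, h1, ih]
      · by_cases h0 : (PySem.Dict.mk c).get? symbol = some 0
        · cases p <;> cases n <;> simp [hc, h0, ih]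
        · cases p <;> cases n <;> simp [hc, h1, h0, ih]
    · have hc' : (PySem.Dict.mk c).contains symbol = false := by
        rw [← Bool.not_eq_true]; exact hc
      have hnone : (PySem.Dict.mk c).get? symbol = none := by
        rw [PySem.Dict.get?_eq_none_iff_contains]
        exact hc'
      rw [if_neg hc]
      simp [ih, hnone]

-- membership in B's sets after recording one clause
theorem pvRecord_fold_mem (clause l : List (String × Int)) (pn : PySem.Set String × PySem.Set String) (k : String) :
    (k ∈ (l.foldl (fun pn kv =>
        if (PySem.Dict.mk clause).get? kv.1 = some 1 then (pn.1, PySem.Set.add pn.2 kv.1)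
        else if (PySem.Dict.mk clause).get? kv.1 = some 0 then (PySem.Set.add pn.1 kv.1, pn.2)
        else pn) pn).1
      ↔ k ∈ pn.1 ∨ ((∃ v, (k, v) ∈ l) ∧ (PySem.Dict.mk clause).get? k = some 0)) ∧
    (k ∈ (l.foldl (fun pn kv =>
        if (PySem.Dict.mk clause).get? kv.1 = some 1 then (pn.1, PySem.Set.add pn.2 kv.1)
        else if (PySem.Dict.mk clause).get? kv.1 = some 0 then (PySem.Set.add pn.1 kv.1, pn.2)
        else pn) pn).2
      ↔ k ∈ pn.2 ∨ ((∃ v, (k, v) ∈ l) ∧ (PySem.Dict.mk clause).get? k = some 1)) := by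
  induction l generalizing pn with
  | nil => simp
  | cons kv rest ih =>
    obtain ⟨k1, v1⟩ := kv
    simp only [List.foldl_cons]
    by_cases h1 : (PySem.Dict.mk clause).get? k1 = some 1
    · rw [if_pos h1]
      rw [(ih _).1, (ih _).2]
      simp only [PySem.Set.mem_add, List.mem_cons, Prod.mk.injEq]
      constructor
      · constructor
        · rintro (h | ⟨⟨v, hv⟩, hg⟩)
          · exact Or.inl h
          · exact Or.inr ⟨⟨v, Or.inr hv⟩, hg⟩
        · rintro (h | ⟨⟨v, ⟨hk, _⟩ | hv⟩, hg⟩)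
          · exact Or.inl h
          · subst hk; rw [h1] at hg; exact absurd hg (by simp)
          · exact Or.inr ⟨⟨v, hv⟩, hg⟩
      · constructor
        · rintro ((h | hk) | ⟨⟨v, hv⟩, hg⟩)
          · exact Or.inl h
          · subst hk; exact Or.inr ⟨⟨v1, Or.inl ⟨rfl, rfl⟩⟩, h1⟩
          · exact Or.inr ⟨⟨v, Or.inr hv⟩, hg⟩
        · rintro (h | ⟨⟨v, ⟨hk, _⟩ | hv⟩, hg⟩)
          · exact Or.inl (Or.inl h)
          · exact Or.inl (Or.inr hk)
          · exact Or.inr ⟨⟨v, hv⟩, hg⟩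
    · by_cases h0 : (PySem.Dict.mk clause).get? k1 = some 0
      · rw [if_neg h1, if_pos h0]
        rw [(ih _).1, (ih _).2]
        simp only [PySem.Set.mem_add, List.mem_cons, Prod.mk.injEq]
        constructor
        · constructor
          · rintro ((h | hk) | ⟨⟨v, hv⟩, hg⟩)
            · exact Or.inl h
            · subst hk; exact Or.inr ⟨⟨v1, Or.inl ⟨rfl, rfl⟩⟩, h0⟩
            · exact Or.inr ⟨⟨v, Or.inr hv⟩, hg⟩
          · rintro (h | ⟨⟨v, ⟨hk, _⟩ | hv⟩, hg⟩)
            · exact Or.inl (Or.inl h)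
            · exact Or.inl (Or.inr hk)
            · exact Or.inr ⟨⟨v, hv⟩, hg⟩
        · constructor
          · rintro (h | ⟨⟨v, hv⟩, hg⟩)
            · exact Or.inl h
            · exact Or.inr ⟨⟨v, Or.inr hv⟩, hg⟩
          · rintro (h | ⟨⟨v, ⟨hk, _⟩ | hv⟩, hg⟩)
            · exact Or.inl h
            · subst hk; rw [h0] at hg; exact absurd hg (by simp)
            · exact Or.inr ⟨⟨v, hv⟩, hg⟩
      · rw [if_neg h1, if_neg h0]
        rw [(ih _).1, (ih _).2]
        simp only [List.mem_cons, Prod.mk.injEq]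
        constructor
        · constructor
          · rintro (h | ⟨⟨v, hv⟩, hg⟩)
            · exact Or.inl h
            · exact Or.inr ⟨⟨v, Or.inr hv⟩, hg⟩
          · rintro (h | ⟨⟨v, ⟨hk, _⟩ | hv⟩, hg⟩)
            · exact Or.inl h
            · subst hk; exact absurd hg h0
            · exact Or.inr ⟨⟨v, hv⟩, hg⟩
        · constructor
          · rintro (h | ⟨⟨v, hv⟩, hg⟩)
            · exact Or.inl h
            · exact Or.inr ⟨⟨v, Or.inr hv⟩, hg⟩
          · rintro (h | ⟨⟨v, ⟨hk, _⟩ | hv⟩, hg⟩)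
            · exact Or.inl h
            · subst hk; exact absurd hg h1
            · exact Or.inr ⟨⟨v, hv⟩, hg⟩

-- if a first-match lookup succeeds, the key occurs in the list
theorem pvGet?_some_key (clause : List (String × Int)) (k : String) (v : Int)
    (h : (PySem.Dict.mk clause).get? k = some v) : ∃ w, (k, w) ∈ clause := by
  induction clause with
  | nil => simp [PySem.Dict.get?] at h
  | cons kv rest ih =>
    rw [PySem.Dict.get?_mk_cons] at h
    by_cases hk : kv.1 == k
    · refine ⟨kv.2, ?_⟩
      simp only [beq_iff_eq] at hk
      rw [← hk]
      simp
    · rw [if_neg hk] at h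
      obtain ⟨w, hw⟩ := ih h
      exact ⟨w, List.mem_cons_of_mem _ hw⟩

-- membership in B's sets after recording a whole clause list
theorem pvFold_mem (cs : List (List (String × Int))) (pn : PySem.Set String × PySem.Set String) (k : String) :
    (k ∈ (cs.foldl (fun pn clause => pvRecord clause pn) pn).1
      ↔ k ∈ pn.1 ∨ ∃ c ∈ cs, (PySem.Dict.mk c).get? k = some 0) ∧
    (k ∈ (cs.foldl (fun pn clause => pvRecord clause pn) pn).2
      ↔ k ∈ pn.2 ∨ ∃ c ∈ cs, (PySem.Dict.mk c).get? k = some 1) := by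
  induction cs generalizing pn with
  | nil => simp
  | cons c rest ih =>
    simp only [List.foldl_cons, List.mem_cons]
    rw [(ih _).1, (ih _).2]
    unfold pvRecord
    rw [(pvRecord_fold_mem c c pn k).1, (pvRecord_fold_mem c c pn k).2]
    constructor
    · constructor
      · rintro ((h | ⟨_, hg⟩) | ⟨c', hc', hg⟩)
        · exact Or.inl h
        · exact Or.inr ⟨c, Or.inl rfl, hg⟩
        · exact Or.inr ⟨c', Or.inr hc', hg⟩
      · rintro (h | ⟨c', rfl | hc', hg⟩)
        · exact Or.inl (Or.inl h)
        · exact Or.inl (Or.inr ⟨pvGet?_some_key _ _ _ hg, hg⟩)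
        · exact Or.inr ⟨c', hc', hg⟩
    · constructor
      · rintro ((h | ⟨_, hg⟩) | ⟨c', hc', hg⟩)
        · exact Or.inl h
        · exact Or.inr ⟨c, Or.inl rfl, hg⟩
        · exact Or.inr ⟨c', Or.inr hc', hg⟩
      · rintro (h | ⟨c', rfl | hc', hg⟩)
        · exact Or.inl (Or.inl h)
        · exact Or.inl (Or.inr ⟨pvGet?_some_key _ _ _ hg, hg⟩)
        · exact Or.inr ⟨c', hc', hg⟩

-- ===== VERDICT (by name: the statement is the Claim_ definition above) =====
theorem extractPureSymbols_spec : Claim_equal_extractPureSymbols := by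
  intro symbols current_clauses hd
  show extractPureSymbols symbols current_clauses = extractPureSymbols_alt symbols current_clauses
  clear hd
  unfold extractPureSymbols extractPureSymbols_alt
  induction symbols with
  | nil => rfl
  | cons symbol rest ih =>
    simp only [pvOuterA, pvScanB]
    rw [pvInnerA_eq]
    have hpos : (PySem.Set.contains
        (current_clauses.foldl (fun pn clause => pvRecord clause pn) (PySem.Set.empty, PySem.Set.empty)).1 symbol)
        = current_clauses.any (fun c => (PySem.Dict.mk c).get? symbol = some 0) := by
      rw [Bool.eq_iff_iff]
      simp only [PySem.Set.contains, List.contains_iff_mem, List.any_eq_true, decide_eq_true_iff]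
      rw [(pvFold_mem current_clauses _ symbol).1]
      simp [PySem.Set.empty]
    have hneg : (PySem.Set.contains
        (current_clauses.foldl (fun pn clause => pvRecord clause pn) (PySem.Set.empty, PySem.Set.empty)).2 symbol)
        = current_clauses.any (fun c => (PySem.Dict.mk c).get? symbol = some 1) := by
      rw [Bool.eq_iff_iff]
      simp only [PySem.Set.contains, List.contains_iff_mem, List.any_eq_true, decide_eq_true_iff]
      rw [(pvFold_mem current_clauses _ symbol).2]
      simp [PySem.Set.empty]
    rw [hpos, hneg]
    simp only [Bool.false_or]
    split_ifs <;> simp_all
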